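-- pv_equiv track=rewrite | github.com/Prospero1988/SpecFAI | preparation_total.py | remove_columns
-- ===== SOURCE A (Python) =====
-- def remove_columns(data, ranges):
--     cleaned_data = []
--     for row in data:
--         cleaned_row = []
--         for i, value in enumerate(row):
--             skip_column = any(start <= i <= end for start, end in ranges)
--             if not skip_column:
--                 cleaned_row.append(value)
--         cleaned_data.append(cleaned_row)
--     return cleaned_data
-- ===== SOURCE B (Python) =====
-- def remove_columns(data, ranges):
--     # Normalize ranges to non-empty intervals over indices >= 0, sort by start,
--     # merge overlapping/adjacent ones, then keep each row's complement by slicing.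
--     norm = sorted([(max(s, 0), e) for s, e in ranges if max(s, 0) <= e],
--                   key=lambda r: r[0])
--     merged = []
--     for s, e in norm:
--         if merged and s <= merged[-1][1] + 1:
--             if e > merged[-1][1]:
--                 merged[-1] = (merged[-1][0], e)
--         else:
--             merged.append((s, e))
--     cleaned_data = []
--     for row in data:
--         out = []
--         prev = 0
--         for s, e in merged:
--             out += row[prev:s]
--             prev = e + 1
--         out += row[prev:]
--         cleaned_data.append(out)
--     return cleaned_data
-- ===== Notes on version B (the rewrite author's own statement) =====
-- stated objective: faster
-- what changed: Replaces the per-cell scan over all ranges with a one-time sort-and-merge of the ranges into disjoint dropped intervals, then builds each cleaned row by concatenating the complementary contiguous slices.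
import Mathlib
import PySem

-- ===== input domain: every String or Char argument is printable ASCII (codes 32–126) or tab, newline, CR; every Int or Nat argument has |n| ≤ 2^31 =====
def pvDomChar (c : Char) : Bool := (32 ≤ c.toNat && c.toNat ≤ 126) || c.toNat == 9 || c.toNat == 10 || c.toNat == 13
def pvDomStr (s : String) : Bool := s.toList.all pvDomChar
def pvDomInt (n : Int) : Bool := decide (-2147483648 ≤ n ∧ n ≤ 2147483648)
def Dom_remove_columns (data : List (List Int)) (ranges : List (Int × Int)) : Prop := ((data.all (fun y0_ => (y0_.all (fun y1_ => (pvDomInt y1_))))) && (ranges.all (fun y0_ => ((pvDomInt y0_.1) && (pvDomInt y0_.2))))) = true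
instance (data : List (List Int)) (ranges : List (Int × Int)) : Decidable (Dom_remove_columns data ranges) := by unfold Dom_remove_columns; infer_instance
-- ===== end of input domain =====

-- B changes the algorithm: instead of testing every cell index against every range,
-- it merges the ranges once into disjoint dropped intervals and concatenates the
-- complementary slices of each row.

-- ===== PORT A =====
-- 'any(start <= i <= end for start, end in ranges)' (A's skip_column test; also reused
-- by the proofs as interval membership for B's merged lists)
def pvCovers (ivs : List (Int × Int)) (i : Int) : Bool :=
  ivs.any (fun se => decide (se.1 ≤ i) && decide (i ≤ se.2))

def remove_columns (data : List (List Int)) (ranges : List (Int × Int)) : List (List Int) :=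
  data.foldl (fun cleaned row =>
    cleaned ++ [(PySem.List.enumerate row 0).foldl (fun cr iv =>
      if pvCovers ranges iv.1 then cr else cr ++ [iv.2]) []]) []

-- ===== PORT B =====
-- '[(max(s,0), e) for s,e in ranges if max(s,0) <= e]'
def pvNorm (ranges : List (Int × Int)) : List (Int × Int) :=
  ranges.filterMap (fun se => if max se.1 0 ≤ se.2 then some (max se.1 0, se.2) else none)

-- the merge loop body; the accumulator is Python's 'merged' kept in reverse so that
-- 'merged[-1]' (access/overwrite of the last element) is the head; reversed at the end
def pvMergeStep (acc : List (Int × Int)) (se : Int × Int) : List (Int × Int) :=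
  match acc with
  | last :: tl =>
      if se.1 ≤ last.2 + 1 then
        (if last.2 < se.2 then (last.1, se.2) :: tl else last :: tl)
      else se :: last :: tl
  | [] => [se]

def pvMerged (ranges : List (Int × Int)) : List (Int × Int) :=
  ((PySem.List.sorted (pvNorm ranges) (fun r => r.1) false).foldl pvMergeStep []).reverse

def remove_columns_alt (data : List (List Int)) (ranges : List (Int × Int)) : List (List Int) :=
  let merged := pvMerged ranges
  data.foldl (fun cleaned row =>
    let st := merged.foldl (fun (p : List Int × Int) se =>
        (p.1 ++ PySem.List.slice row (some p.2) (some se.1), se.2 + 1)) ([], 0)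
    cleaned ++ [st.1 ++ PySem.List.slice row (some st.2) none]) []

-- ===== PRECONDITION & SPEC =====
def Spec_remove_columns (data : List (List Int)) (ranges : List (Int × Int)) (out : List (List Int)) : Prop := out = remove_columns_alt data ranges
instance (data : List (List Int)) (ranges : List (Int × Int)) (out : List (List Int)) : Decidable (Spec_remove_columns data ranges out) := by unfold Spec_remove_columns; infer_instance

-- ===== CLAIM (what is proved, stated in full; the proofs are below) =====
def Claim_equal_remove_columns : Prop := ∀ (data : List (List Int)) (ranges : List (Int × Int)), Dom_remove_columns data ranges → Spec_remove_columns data ranges (remove_columns data ranges)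

-- ===== LEMMAS AND PROOFS =====

-- the kept elements of a row, starting at absolute index k, under drop-predicate P
def pvKeepFrom (P : Nat → Bool) : List Int → Nat → List Int
  | [], _ => []
  | v :: t, k => if P k then pvKeepFrom P t (k + 1) else v :: pvKeepFrom P t (k + 1)

-- A's inner loop is pvKeepFrom
theorem pvA_inner (ranges : List (Int × Int)) :
    ∀ (row : List Int) (k : Nat) (acc : List Int),
    (PySem.List.enumerate row (k : Int)).foldl (fun cr iv =>
      if pvCovers ranges iv.1 then cr else cr ++ [iv.2]) acc
    = acc ++ pvKeepFrom (fun n => pvCovers ranges (n : Int)) row k := by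
  intro row
  induction row with
  | nil => intro k acc; simp [PySem.List.enumerate_nil, pvKeepFrom]
  | cons v t ih =>
    intro k acc
    rw [PySem.List.enumerate_cons]
    simp only [List.foldl_cons]
    have hcast : ((k : Int) + 1) = ((k + 1 : Nat) : Int) := by push_cast; ring
    by_cases h : pvCovers ranges (k : Int)
    · simp only [h, if_true, hcast, ih]
      simp [pvKeepFrom, h]
    · simp only [h, Bool.false_eq_true, if_false, hcast, ih]
      simp [pvKeepFrom, h]

-- interval chains: strictly separated (gap ≥ 1), nonempty, starts ≥ p
def pvChainInv (p : Int) (M : List (Int × Int)) : Prop :=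
  List.IsChain (fun a b => a.2 + 2 ≤ b.1) M ∧ ∀ se ∈ M, p ≤ se.1 ∧ se.1 ≤ se.2

theorem pvCovers_cons (s e i : Int) (t : List (Int × Int)) :
    pvCovers ((s, e) :: t) i = ((decide (s ≤ i) && decide (i ≤ e)) || pvCovers t i) := by
  simp [pvCovers]

theorem pvCovers_false_below (M : List (Int × Int)) (q i : Int)
    (hq : ∀ se ∈ M, q ≤ se.1) (hi : i < q) : pvCovers M i = false := by
  simp only [pvCovers, List.any_eq_false]
  intro se hse
  have := hq se hse
  simp only [Bool.and_eq_true, decide_eq_true_eq, not_and]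
  omega

theorem pvChain_lower :
    ∀ (t : List (Int × Int)) (s e : Int),
    List.IsChain (fun a b => a.2 + 2 ≤ b.1) ((s, e) :: t) →
    (∀ se ∈ t, se.1 ≤ se.2) → ∀ se ∈ t, e + 2 ≤ se.1 := by
  intro t
  induction t with
  | nil => intro s e _ _ se hse; simp at hse
  | cons hd tl ih =>
    intro s e hch hb se hse
    rw [List.isChain_cons_cons] at hch
    rcases List.mem_cons.mp hse with heq | hse
    · subst heq; exact hch.1
    · have h1 := ih hd.1 hd.2 hch.2 (fun x hx => hb x (List.mem_cons_of_mem _ hx)) se hse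
      have h2 := hb hd (List.mem_cons_self)
      omega

theorem pvChainInv_tail (p : Int) (s e : Int) (t : List (Int × Int))
    (h : pvChainInv p ((s, e) :: t)) : pvChainInv (e + 1) t := by
  obtain ⟨hch, hb⟩ := h
  refine ⟨(List.isChain_cons.mp hch).2, ?_⟩
  intro se hse
  have h1 := pvChain_lower t s e hch (fun x hx => (hb x (List.mem_cons_of_mem _ hx)).2) se hse
  have h2 := hb se (List.mem_cons_of_mem _ hse)
  omega

-- kept-run split: P false on [k, k+n)
theorem pvKeepFrom_take (P : Nat → Bool) :
    ∀ (n : Nat) (l : List Int) (k : Nat), (∀ i, k ≤ i → i < k + n → P i = false) →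
    pvKeepFrom P l k = l.take n ++ pvKeepFrom P (l.drop n) (k + n) := by
  intro n
  induction n with
  | zero => intro l k _; simp
  | succ n ih =>
    intro l k hF
    cases l with
    | nil => simp [pvKeepFrom]
    | cons v t =>
      have hk : P k = false := hF k le_rfl (by omega)
      simp only [pvKeepFrom, hk, Bool.false_eq_true, if_false, List.take_succ_cons,
        List.drop_succ_cons, List.cons_append]
      rw [ih t (k + 1) (fun i h1 h2 => hF i (by omega) (by omega))]
      rw [Nat.add_assoc, Nat.add_comm 1 n]

-- dropped-run split: P true on [k, k+n)
theorem pvKeepFrom_drop (P : Nat → Bool) :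
    ∀ (n : Nat) (l : List Int) (k : Nat), (∀ i, k ≤ i → i < k + n → P i = true) →
    pvKeepFrom P l k = pvKeepFrom P (l.drop n) (k + n) := by
  intro n
  induction n with
  | zero => intro l k _; simp
  | succ n ih =>
    intro l k hT
    cases l with
    | nil => simp [pvKeepFrom]
    | cons v t =>
      have hk : P k = true := hT k le_rfl (by omega)
      simp only [pvKeepFrom, hk, if_true, List.drop_succ_cons]
      rw [ih t (k + 1) (fun i h1 h2 => hT i (by omega) (by omega))]
      congr 1
      omega

theorem pvKeepFrom_all_false (P : Nat → Bool) :
    ∀ (l : List Int) (k : Nat), (∀ i, k ≤ i → P i = false) → pvKeepFrom P l k = l := by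
  intro l
  induction l with
  | nil => intro k _; rfl
  | cons v t ih =>
    intro k hF
    simp only [pvKeepFrom, hF k le_rfl, Bool.false_eq_true, if_false]
    rw [ih (k + 1) (fun i hi => hF i (by omega))]

-- B's slice loop computes pvKeepFrom of the coverage predicate
theorem pvB_inner (P : Nat → Bool) :
    ∀ (M : List (Int × Int)) (row out : List Int) (p : Nat),
    pvChainInv (p : Int) M → (∀ n : Nat, p ≤ n → P n = pvCovers M (n : Int)) →
    (let st := M.foldl (fun (q : List Int × Int) se =>
        (q.1 ++ PySem.List.slice row (some q.2) (some se.1), se.2 + 1)) (out, (p : Int))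
     st.1 ++ PySem.List.slice row (some st.2) none)
    = out ++ pvKeepFrom P (row.drop p) p := by
  intro M
  induction M with
  | nil =>
    intro row out p _ hP
    simp only [List.foldl_nil]
    rw [PySem.List.slice_from_natCast]
    rw [pvKeepFrom_all_false P (row.drop p) p (fun i hi => by rw [hP i hi]; simp [pvCovers])]
  | cons hd t ih =>
    intro row out p hInv hP
    obtain ⟨s, e⟩ := hd
    have hps : (p : Int) ≤ s := (hInv.2 (s, e) List.mem_cons_self).1
    have hse : s ≤ e := (hInv.2 (s, e) List.mem_cons_self).2
    have hlow : ∀ se ∈ t, e + 2 ≤ se.1 :=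
      pvChain_lower t s e hInv.1 (fun x hx => (hInv.2 x (List.mem_cons_of_mem _ hx)).2)
    have hs : s = ((s.toNat : Nat) : Int) := by omega
    have he1 : e + 1 = ((e.toNat + 1 : Nat) : Int) := by omega
    simp only [List.foldl_cons]
    rw [hs, PySem.List.slice_natCast, he1]
    rw [ih row (out ++ (row.drop p).take (s.toNat - p)) (e.toNat + 1)
      (by
        have h2 := pvChainInv_tail p s e t hInv
        have : ((e.toNat + 1 : Nat) : Int) = e + 1 := by omega
        rw [this]; exact h2)
      (by
        intro n hn
        rw [hP n (by omega), pvCovers_cons]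
        have h3 : (decide (s ≤ (n : Int)) && decide ((n : Int) ≤ e)) = false := by
          simp only [Bool.and_eq_false_iff, decide_eq_false_iff_not, not_le]; omega
        rw [h3, Bool.false_or])]
    rw [pvKeepFrom_take P (s.toNat - p) (row.drop p) p
      (by
        intro i h1 h2
        rw [hP i h1, pvCovers_cons]
        have h3 : (decide (s ≤ (i : Int)) && decide ((i : Int) ≤ e)) = false := by
          simp only [Bool.and_eq_false_iff, decide_eq_false_iff_not, not_le]; omega
        have h4 : pvCovers t (i : Int) = false :=
          pvCovers_false_below t (e + 2) (i : Int) hlow (by omega)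
        rw [h3, h4, Bool.false_or])]
    rw [List.drop_drop]
    have hds : p + (s.toNat - p) = s.toNat := by omega
    rw [hds]
    rw [pvKeepFrom_drop P (e.toNat + 1 - s.toNat) (row.drop s.toNat) s.toNat
      (by
        intro i h1 h2
        rw [hP i (by omega), pvCovers_cons]
        have h3 : (decide (s ≤ (i : Int)) && decide ((i : Int) ≤ e)) = true := by
          simp only [Bool.and_eq_true, decide_eq_true_eq]; omega
        rw [h3, Bool.true_or])]
    have h6 : s.toNat + (e.toNat + 1 - s.toNat) = e.toNat + 1 := by omega
    rw [h6, List.append_assoc, List.drop_drop, h6]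

-- the merge loop: preserves the reversed chain invariant and coverage
def pvRInv (acc : List (Int × Int)) : Prop :=
  List.IsChain (fun a b => b.2 + 2 ≤ a.1) acc ∧ ∀ se ∈ acc, 0 ≤ se.1 ∧ se.1 ≤ se.2

theorem pvMerge_loop :
    ∀ (norm acc : List (Int × Int)),
    (∀ se ∈ norm, 0 ≤ se.1 ∧ se.1 ≤ se.2) →
    norm.Pairwise (fun a b => a.1 ≤ b.1) →
    pvRInv acc →
    (∀ h ∈ acc.head?, ∀ se ∈ norm, h.1 ≤ se.1) →
    pvRInv (norm.foldl pvMergeStep acc) ∧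
      ∀ i, pvCovers (norm.foldl pvMergeStep acc) i = (pvCovers acc i || pvCovers norm i) := by
  intro norm
  induction norm with
  | nil =>
    intro acc _ _ hR _
    exact ⟨hR, by intro i; simp [pvCovers]⟩
  | cons se rest ih =>
    intro acc hb hpw hR hhead
    obtain ⟨s, e⟩ := se
    have hse : 0 ≤ s ∧ s ≤ e := hb (s, e) List.mem_cons_self
    have hbrest : ∀ x ∈ rest, 0 ≤ x.1 ∧ x.1 ≤ x.2 := fun x hx => hb x (List.mem_cons_of_mem _ hx)
    have hpw' := List.pairwise_cons.mp hpw
    simp only [List.foldl_cons]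
    have key : pvRInv (pvMergeStep acc (s, e)) ∧
        (∀ h ∈ (pvMergeStep acc (s, e)).head?, ∀ x ∈ rest, h.1 ≤ x.1) ∧
        (∀ i, pvCovers (pvMergeStep acc (s, e)) i
            = (pvCovers acc i || (decide (s ≤ i) && decide (i ≤ e)))) := by
      cases acc with
      | nil =>
        refine ⟨⟨by simp [pvMergeStep], ?_⟩, ?_, ?_⟩
        · intro x hx
          simp only [pvMergeStep] at hx
          rcases List.mem_singleton.mp hx with rfl
          exact hse
        · intro h hh x hx
          simp only [pvMergeStep, List.head?_cons, Option.mem_def, Option.some.injEq] at hh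
          rw [← hh]
          exact hpw'.1 x hx
        · intro i
          simp [pvMergeStep, pvCovers]
      | cons last tl =>
        obtain ⟨ps, pe⟩ := last
        have hhd : ps ≤ s := hhead (ps, pe) rfl (s, e) List.mem_cons_self
        have hRb := hR.2 (ps, pe) List.mem_cons_self
        have hch := List.isChain_cons.mp hR.1
        by_cases h1 : s ≤ pe + 1
        · by_cases h2 : pe < e
          · have hstep : pvMergeStep ((ps, pe) :: tl) (s, e) = (ps, e) :: tl := by
              simp [pvMergeStep, h1, h2]
            rw [hstep]
            refine ⟨⟨List.isChain_cons.mpr ⟨hch.1, hch.2⟩, ?_⟩, ?_, ?_⟩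
            · intro x hx
              rcases List.mem_cons.mp hx with heq | hx
              · subst heq; constructor <;> omega
              · exact hR.2 x (List.mem_cons_of_mem _ hx)
            · intro h hh x hx
              simp only [List.head?_cons, Option.mem_def, Option.some.injEq] at hh
              rw [← hh]
              have h3 : s ≤ x.1 := hpw'.1 x hx
              show ps ≤ x.1
              omega
            · intro i
              rw [pvCovers_cons, pvCovers_cons]
              cases hc : pvCovers tl i
              · rw [Bool.eq_iff_iff]
                simp only [Bool.or_false, Bool.or_eq_true, Bool.and_eq_true, decide_eq_true_eq]
                omega
              · simp
          · have hstep : pvMergeStep ((ps, pe) :: tl) (s, e) = (ps, pe) :: tl := by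
              simp [pvMergeStep, h1, h2]
            rw [hstep]
            refine ⟨hR, ?_, ?_⟩
            · intro h hh x hx
              simp only [List.head?_cons, Option.mem_def, Option.some.injEq] at hh
              rw [← hh]
              have h3 : s ≤ x.1 := hpw'.1 x hx
              show ps ≤ x.1
              omega
            · intro i
              rw [pvCovers_cons]
              cases hc : pvCovers tl i
              · rw [Bool.eq_iff_iff]
                simp only [Bool.or_false, Bool.or_eq_true, Bool.and_eq_true, decide_eq_true_eq]
                omega
              · simp
        · have hstep : pvMergeStep ((ps, pe) :: tl) (s, e) = (s, e) :: (ps, pe) :: tl := by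
            simp [pvMergeStep, h1]
          rw [hstep]
          refine ⟨⟨?_, ?_⟩, ?_, ?_⟩
          · rw [List.isChain_cons_cons]
            exact ⟨by simp only; omega, hR.1⟩
          · intro x hx
            rcases List.mem_cons.mp hx with heq | hx
            · subst heq; exact hse
            · exact hR.2 x hx
          · intro h hh x hx
            simp only [List.head?_cons, Option.mem_def, Option.some.injEq] at hh
            rw [← hh]
            exact hpw'.1 x hx
          · intro i
            rw [pvCovers_cons, Bool.or_comm]
    obtain ⟨k1, k2, k3⟩ := key
    obtain ⟨r1, r2⟩ := ih (pvMergeStep acc (s, e)) hbrest hpw'.2 k1 k2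
    refine ⟨r1, ?_⟩
    intro i
    rw [r2 i, k3 i, pvCovers_cons]
    cases pvCovers acc i <;> cases (decide (s ≤ i) && decide (i ≤ e)) <;>
      cases pvCovers rest i <;> simp

theorem pvNorm_mem (ranges : List (Int × Int)) :
    ∀ se ∈ pvNorm ranges, 0 ≤ se.1 ∧ se.1 ≤ se.2 := by
  intro se hse
  simp only [pvNorm, List.mem_filterMap] at hse
  obtain ⟨a, _, hf⟩ := hse
  split_ifs at hf with h
  · obtain rfl := Option.some.inj hf
    exact ⟨le_max_right _ _, h⟩

theorem pvSorted_hyps (ranges : List (Int × Int)) :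
    (∀ se ∈ PySem.List.sorted (pvNorm ranges) (fun r => r.1) false, 0 ≤ se.1 ∧ se.1 ≤ se.2) ∧
      (PySem.List.sorted (pvNorm ranges) (fun r => r.1) false).Pairwise (fun a b => a.1 ≤ b.1) := by
  constructor
  · intro se hse
    exact pvNorm_mem ranges se ((PySem.List.mem_sorted _ _ _ _).mp hse)
  · exact PySem.List.sorted_pairwise (pvNorm ranges) (fun r => r.1)

theorem pvMerged_chain (ranges : List (Int × Int)) : pvChainInv 0 (pvMerged ranges) := by
  obtain ⟨hb, hpw⟩ := pvSorted_hyps ranges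
  have h := pvMerge_loop _ [] hb hpw ⟨by simp, by simp⟩ (by simp)
  unfold pvMerged
  constructor
  · rw [List.isChain_reverse]
    exact h.1.1
  · intro se hse
    rw [List.mem_reverse] at hse
    have h2 := h.1.2 se hse
    exact h2

theorem pvNorm_covers (t : List (Int × Int)) (n : Nat) :
    pvCovers (pvNorm t) (n : Int) = pvCovers t (n : Int) := by
  induction t with
  | nil => rfl
  | cons a t ihp =>
    obtain ⟨s, e⟩ := a
    by_cases hc : max s 0 ≤ e
    · have hn : pvNorm ((s, e) :: t) = (max s 0, e) :: pvNorm t := by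
        unfold pvNorm
        rw [List.filterMap_cons]
        dsimp only
        rw [if_pos hc]
      rw [hn, pvCovers_cons, pvCovers_cons, ihp]
      congr 1
      rw [Bool.eq_iff_iff]
      simp only [Bool.and_eq_true, decide_eq_true_eq]
      omega
    · have hn : pvNorm ((s, e) :: t) = pvNorm t := by
        unfold pvNorm
        rw [List.filterMap_cons]
        dsimp only
        rw [if_neg hc]
      rw [hn, pvCovers_cons, ihp]
      have hh : (decide (s ≤ (n : Int)) && decide ((n : Int) ≤ e)) = false := by
        simp only [Bool.and_eq_false_iff, decide_eq_false_iff_not, not_le]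
        omega
      rw [hh, Bool.false_or]

theorem pvMerged_covers (ranges : List (Int × Int)) (n : Nat) :
    pvCovers (pvMerged ranges) (n : Int) = pvCovers ranges (n : Int) := by
  obtain ⟨hb, hpw⟩ := pvSorted_hyps ranges
  have h := pvMerge_loop _ [] hb hpw ⟨by simp, by simp⟩ (by simp)
  unfold pvMerged
  have hrev : ∀ (l : List (Int × Int)) (i : Int), pvCovers l.reverse i = pvCovers l i := by
    intro l i; simp [pvCovers]
  rw [hrev, h.2 (n : Int)]
  have hsort : pvCovers (PySem.List.sorted (pvNorm ranges) (fun r => r.1) false) (n : Int)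
      = pvCovers (pvNorm ranges) (n : Int) := by
    simp only [pvCovers]
    exact List.Perm.any_eq (PySem.List.sorted_perm (pvNorm ranges) (fun r => r.1) false)
  have hcempty : pvCovers ([] : List (Int × Int)) (n : Int) = false := by simp [pvCovers]
  rw [hcempty, Bool.false_or, hsort, pvNorm_covers]

-- ===== VERDICT (by name: the statement is the Claim_ definition above) =====
theorem remove_columns_spec : Claim_equal_remove_columns := by
  intro data ranges _
  unfold Spec_remove_columns remove_columns remove_columns_alt
  rw [PySem.List.foldl_append_singleton_eq_map, PySem.List.foldl_append_singleton_eq_map]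
  apply List.map_congr_left
  intro row _
  have hA := pvA_inner ranges row 0 []
  simp only [Nat.cast_zero] at hA
  rw [hA]
  have hB := pvB_inner (fun n => pvCovers ranges (n : Int)) (pvMerged ranges) row [] 0
    (by simpa using pvMerged_chain ranges)
    (by intro n _; exact (pvMerged_covers ranges n).symm)
  simp only [Nat.cast_zero, List.drop_zero] at hB
  simpa using hB.symm
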